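-- pv_equiv track=rewrite | github.com/heyhenry/python-problemsolving | October_2023/071023/pset_02/row_sum.py | row_sum
-- ===== SOURCE A (Python) =====
-- def row_sum(table : list[list[int]]) -> list[list[int]]:
--
--     result = []
--
--     for row in table:
--         num = 0
--         temp = []
--         for i in row:
--             num += i
--             temp.append(num)
--         result.append(temp)
--
--     return result
-- ===== SOURCE B (Python) =====
-- def row_sum(table: list[list[int]]) -> list[list[int]]:
--     # each prefix computed independently as sum of the growing slice
--     return [[sum(row[:i + 1]) for i in range(len(row))] for row in table]
-- ===== Notes on version B (the rewrite author's own statement) =====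
-- stated objective: alternative
-- what changed: Replaces the accumulator threaded through nested loops with a comprehension that computes each prefix sum independently by summing the slice row[:i+1].
import Mathlib
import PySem

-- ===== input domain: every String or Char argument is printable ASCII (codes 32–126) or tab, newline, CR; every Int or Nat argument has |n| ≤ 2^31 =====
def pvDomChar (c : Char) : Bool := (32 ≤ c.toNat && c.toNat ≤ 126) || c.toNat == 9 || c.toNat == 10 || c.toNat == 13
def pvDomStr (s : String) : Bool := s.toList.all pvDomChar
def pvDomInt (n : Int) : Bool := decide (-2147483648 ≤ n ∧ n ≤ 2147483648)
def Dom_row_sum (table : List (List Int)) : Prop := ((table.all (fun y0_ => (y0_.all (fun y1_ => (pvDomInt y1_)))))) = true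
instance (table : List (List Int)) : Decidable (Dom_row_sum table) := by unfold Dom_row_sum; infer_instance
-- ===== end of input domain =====

-- B replaces A's threaded running accumulator by recomputing each prefix sum independently (sum of row[:i+1]); same results, alternative decomposition.

-- ===== PORT A =====
-- inner loop: threads (num, temp) through the row, appending the running sum
def row_sum (table : List (List Int)) : List (List Int) :=
  table.foldl
    (fun result row =>
      let p := row.foldl (fun (s : Int × List Int) i => (s.1 + i, s.2 ++ [s.1 + i])) (0, [])
      result ++ [p.2])
    []

-- ===== PORT B =====
-- row[:i+1] with i ≥ 0 is exactly List.take (i+1) (PySem.List.slice_to); sum(...) is List.sum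
def row_sum_alt (table : List (List Int)) : List (List Int) :=
  table.map (fun row => (List.range row.length).map (fun i => (row.take (i + 1)).sum))

-- ===== PRECONDITION & SPEC =====
def Spec_row_sum (table : List (List Int)) (out : List (List Int)) : Prop := out = row_sum_alt table
instance (table : List (List Int)) (out : List (List Int)) : Decidable (Spec_row_sum table out) := by unfold Spec_row_sum; infer_instance

-- ===== CLAIM (what is proved, stated in full; the proofs are below) =====
def Claim_equal_row_sum : Prop := ∀ (table : List (List Int)), Dom_row_sum table → Spec_row_sum table (row_sum table)

-- ===== LEMMAS AND PROOFS =====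
lemma row_sum_inner (row : List Int) (s : Int) (acc : List Int) :
    (row.foldl (fun (st : Int × List Int) i => (st.1 + i, st.2 ++ [st.1 + i])) (s, acc)).2
      = acc ++ (List.range row.length).map (fun i => s + (row.take (i + 1)).sum) := by
  induction row generalizing s acc with
  | nil => simp
  | cons a t ih =>
    simp only [List.foldl_cons, ih, List.length_cons, List.range_succ_eq_map,
      List.map_cons, List.map_map]
    simp [Function.comp, List.append_assoc, add_assoc]

lemma row_sum_outer (table : List (List Int)) (acc : List (List Int)) :
    table.foldl
      (fun result row =>
        let p := row.foldl (fun (s : Int × List Int) i => (s.1 + i, s.2 ++ [s.1 + i])) (0, [])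
        result ++ [p.2])
      acc
    = acc ++ table.map (fun row => (List.range row.length).map (fun i => (row.take (i + 1)).sum)) := by
  induction table generalizing acc with
  | nil => simp
  | cons r t ih =>
    simp only [List.foldl_cons, ih, List.map_cons]
    have h := row_sum_inner r 0 []
    simp only [h]
    simp

-- ===== VERDICT (by name: the statement is the Claim_ definition above) =====
theorem row_sum_spec : Claim_equal_row_sum := by
  intro table _
  unfold Spec_row_sum row_sum row_sum_alt
  exact row_sum_outer table []
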